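-- pv_equiv track=rewrite | github.com/Ravichandran-Arumugadas/BUT-Informatique | Première année en BUT Informatique/S1.02 - Comparaison d'approches algorithmiques/community_detection.py | les_plus_pop
-- ===== SOURCE A (Python) =====
-- def nb_amis_plus_pop (dico_reseau):
--     """ Retourne le nombre d'amis des personnes ayant le plus d'amis."""
--     personnes = list(dico_reseau)
--     maxi = len(dico_reseau[personnes[0]])
--     i = 1
--     while i < len(personnes):
--         if maxi < len(dico_reseau[personnes[i]]):
--             maxi = len(dico_reseau[personnes[i]])
--         i += 1
--     return maxi
--
-- def les_plus_pop (dico_reseau):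
--     """ Retourne les personnes les plus populaires, c'est-à-dire ayant le plus d'amis."""
--     max_amis = nb_amis_plus_pop(dico_reseau)
--     most_pop = []
--     personnes = list(dico_reseau)
--     i = 1
--     while i < len(personnes):
--         if len(dico_reseau[personnes[i]]) == max_amis:
--             most_pop.append(personnes[i])
--         i += 1
--     return most_pop
-- ===== SOURCE B (Python) =====
-- def les_plus_pop(dico_reseau):
--     """Single pass: track the running max and reset the candidate list on a new max.
--     Keeps A's quirk that the first person seeds the max but is never listed."""
--     personnes = list(dico_reseau)
--     maxi = len(dico_reseau[personnes[0]])
--     most_pop = []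
--     for p in personnes[1:]:
--         n = len(dico_reseau[p])
--         if n > maxi:
--             maxi = n
--             most_pop = [p]
--         elif n == maxi:
--             most_pop.append(p)
--     return most_pop
-- ===== Notes on version B (the rewrite author's own statement) =====
-- stated objective: simpler
-- what changed: B merges A's two scans (one to find the max friend count, one to collect matches) into a single pass that resets the candidate list whenever a larger count appears.
import Mathlib
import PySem

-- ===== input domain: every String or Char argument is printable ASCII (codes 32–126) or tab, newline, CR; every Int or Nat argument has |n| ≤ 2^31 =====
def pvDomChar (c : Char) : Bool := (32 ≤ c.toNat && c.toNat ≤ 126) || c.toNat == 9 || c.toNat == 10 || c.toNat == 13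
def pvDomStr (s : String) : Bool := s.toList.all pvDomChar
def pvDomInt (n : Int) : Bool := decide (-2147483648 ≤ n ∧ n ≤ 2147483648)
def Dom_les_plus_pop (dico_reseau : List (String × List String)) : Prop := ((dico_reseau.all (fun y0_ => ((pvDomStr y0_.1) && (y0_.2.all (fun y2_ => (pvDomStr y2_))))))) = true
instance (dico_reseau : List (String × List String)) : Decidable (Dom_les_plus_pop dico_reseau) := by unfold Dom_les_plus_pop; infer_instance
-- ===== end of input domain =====

-- B merges A's two scans into one pass that resets the candidate list on a new max; same value everywhere A returns.

-- ===== PORT A =====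
-- friend count of person p (len(dico_reseau[p]); keys always present, so the default is never hit)
def pvCount (dico_reseau : List (String × List String)) (p : String) : Int :=
  ((PySem.Dict.mk dico_reseau).getD p []).length

def nb_amis_plus_pop (dico_reseau : List (String × List String)) : Int :=
  let personnes := (PySem.Dict.mk dico_reseau).keys
  let maxi : Int := pvCount dico_reseau (personnes.headD "")
  (personnes.drop 1).foldl
    (fun maxi p => if maxi < pvCount dico_reseau p then pvCount dico_reseau p else maxi) maxi

def les_plus_pop (dico_reseau : List (String × List String)) : List String :=
  let max_amis := nb_amis_plus_pop dico_reseau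
  let personnes := (PySem.Dict.mk dico_reseau).keys
  (personnes.drop 1).foldl
    (fun most_pop p => if pvCount dico_reseau p = max_amis then most_pop ++ [p] else most_pop) []

-- ===== PORT B =====
def les_plus_pop_alt (dico_reseau : List (String × List String)) : List String :=
  let personnes := (PySem.Dict.mk dico_reseau).keys
  let maxi : Int := pvCount dico_reseau (personnes.headD "")
  let st := (personnes.drop 1).foldl
    (fun (st : Int × List String) p =>
      let n := pvCount dico_reseau p
      if st.1 < n then (n, [p])
      else if n = st.1 then (st.1, st.2 ++ [p])
      else st) (maxi, [])
  st.2

-- ===== PRECONDITION & SPEC =====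
-- Pre_ excludes the empty dict, on which A raises IndexError (personnes[0]).
def Pre_les_plus_pop (dico_reseau : List (String × List String)) : Prop := dico_reseau ≠ []
instance (dico_reseau : List (String × List String)) : Decidable (Pre_les_plus_pop dico_reseau) := by unfold Pre_les_plus_pop; infer_instance
def pvWitness_les_plus_pop : (List (String × List String)) := [("a", ["b"]), ("b", [])]

def Spec_les_plus_pop (dico_reseau : List (String × List String)) (out : List String) : Prop := out = les_plus_pop_alt dico_reseau
instance (dico_reseau : List (String × List String)) (out : List String) : Decidable (Spec_les_plus_pop dico_reseau out) := by unfold Spec_les_plus_pop; infer_instance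

-- ===== CLAIM (what is proved, stated in full; the proofs are below) =====
def Claim_equal_les_plus_pop : Prop := ∀ (dico_reseau : List (String × List String)), Dom_les_plus_pop dico_reseau → Pre_les_plus_pop dico_reseau → Spec_les_plus_pop dico_reseau (les_plus_pop dico_reseau)

-- ===== LEMMAS AND PROOFS =====

-- the running max never decreases
theorem maxF_ge (f : String → Int) (ps : List String) (m : Int) :
    m ≤ ps.foldl (fun a p => if a < f p then f p else a) m := by
  induction ps generalizing m with
  | nil => exact le_refl m
  | cons p rest ih =>
      simp only [List.foldl_cons]
      refine le_trans ?_ (ih (if m < f p then f p else m))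
      split <;> omega

set_option maxRecDepth 8192 in
-- invariant of B's combined fold, relative to A's max fold
theorem combined_spec (f : String → Int) (ps : List String) (m : Int) (acc : List String) :
    ps.foldl
      (fun (st : Int × List String) p =>
        let n := f p
        if st.1 < n then (n, [p])
        else if n = st.1 then (st.1, st.2 ++ [p])
        else st) (m, acc)
    = (ps.foldl (fun a p => if a < f p then f p else a) m,
       (if m = ps.foldl (fun a p => if a < f p then f p else a) m then acc else [])
         ++ ps.filter (fun p => f p = ps.foldl (fun a p => if a < f p then f p else a) m)) := by
  induction ps generalizing m acc with
  | nil => simp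
  | cons p rest ih =>
      simp only [List.foldl_cons, List.filter_cons]
      by_cases h1 : m < f p
      · have hM := maxF_ge f rest (f p)
        simp only [if_pos h1, ih (f p) [p]]
        have hmne : ¬ (m = rest.foldl (fun a p => if a < f p then f p else a) (f p)) := by omega
        by_cases h2 : f p = rest.foldl (fun a p => if a < f p then f p else a) (f p)
        · rw [if_pos h2, if_neg hmne, decide_eq_true h2]; simp
        · rw [if_neg h2, if_neg hmne, decide_eq_false h2]; simp
      · simp only [if_neg h1]
        by_cases h2 : f p = m
        · have hM := maxF_ge f rest m
          simp only [if_pos h2, ih m (acc ++ [p])]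
          by_cases h3 : m = rest.foldl (fun a p => if a < f p then f p else a) m
          · simp [h2, ← h3]
          · have : ¬ (f p = rest.foldl (fun a p => if a < f p then f p else a) m) := by omega
            simp [h2, h3]
        · have hM := maxF_ge f rest m
          simp only [if_neg h2, ih m acc]
          have : ¬ (f p = rest.foldl (fun a p => if a < f p then f p else a) m) := by omega
          simp [this]

theorem les_plus_pop_spec : Claim_equal_les_plus_pop := by
  intro d _ _
  unfold Spec_les_plus_pop les_plus_pop les_plus_pop_alt nb_amis_plus_pop
  simp only [combined_spec (pvCount d)]
  rw [PySem.List.foldl_append_ite_eq_filter]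
  simp
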